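-- pv_equiv track=rewrite | github.com/PabloGuerreroFerragamo/ADA | ADA/PracticaDos/dosChuys.py | knapsack_multidimensional
-- ===== SOURCE A (Python) =====
-- def knapsack_multidimensional(values_fb, values_gg, costs_fb, costs_gg, capacity_fb, capacity_gg):
--     n = len(values_fb)
--
--     # Crear la tabla DP con dimensiones (n+1) x (capacity_fb+1) x (capacity_gg+1)
--     dp = [[[0] * (capacity_gg + 1) for _ in range(capacity_fb + 1)] for _ in range(n + 1)]
--
--     # Rellenar la tabla
--     for i in range(1, n + 1):
--         for fb in range(capacity_fb + 1):
--             for gg in range(capacity_gg + 1):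
--                 # No incluir el anuncio i-1
--                 dp[i][fb][gg] = dp[i - 1][fb][gg]
--
--                 # Incluir el anuncio en Facebook si hay presupuesto
--                 if costs_fb[i - 1] <= fb:
--                     dp[i][fb][gg] = max(dp[i][fb][gg], dp[i - 1][fb - costs_fb[i - 1]][gg] + values_fb[i - 1])
--
--                 # Incluir el anuncio en Google si hay presupuesto
--                 if costs_gg[i - 1] <= gg:
--                     dp[i][fb][gg] = max(dp[i][fb][gg], dp[i - 1][fb][gg - costs_gg[i - 1]] + values_gg[i - 1])
--
--     # Backtracking para encontrar los objetos seleccionados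
--     fb, gg = capacity_fb, capacity_gg
--     selected_fb = []  # Anuncios seleccionados para Facebook
--     selected_gg = []  # Anuncios seleccionados para Google
--
--     for i in range(n, 0, -1):
--         # Si el valor no cambió, el anuncio no se incluyó
--         if dp[i][fb][gg] == dp[i - 1][fb][gg]:
--             continue
--
--         # Si el anuncio se incluyó en Facebook
--         if fb >= costs_fb[i - 1] and dp[i][fb][gg] == dp[i - 1][fb - costs_fb[i - 1]][gg] + values_fb[i - 1]:
--             selected_fb.append(i - 1)  # Guardar el índice del anuncio
--             fb -= costs_fb[i - 1]  # Reducir el presupuesto disponible en Facebook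
--         # Si el anuncio se incluyó en Google
--         elif gg >= costs_gg[i - 1] and dp[i][fb][gg] == dp[i - 1][fb][gg - costs_gg[i - 1]] + values_gg[i - 1]:
--             selected_gg.append(i - 1)  # Guardar el índice del anuncio
--             gg -= costs_gg[i - 1]  # Reducir el presupuesto disponible en Google
--
--     # El resultado estará en dp[n][capacity_fb][capacity_gg]
--     max_value = dp[n][capacity_fb][capacity_gg]
--     return max_value, selected_fb, selected_gg
-- ===== SOURCE B (Python) =====
-- def knapsack_multidimensional(values_fb, values_gg, costs_fb, costs_gg, capacity_fb, capacity_gg):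
--     n = len(values_fb)
--
--     # Pass 1: collect the budget states actually reachable at each level, top-down
--     # from the single full-budget state (instead of enumerating every (fb, gg) cell).
--     needed = [None] * (n + 1)
--     needed[n] = {(capacity_fb, capacity_gg)}
--     for i in range(n, 0, -1):
--         cf = costs_fb[i - 1]
--         cg = costs_gg[i - 1]
--         s = set()
--         for (fb, gg) in needed[i]:
--             s.add((fb, gg))
--             if cf <= fb:
--                 s.add((fb - cf, gg))
--             if cg <= gg:
--                 s.add((fb, gg - cg))
--         needed[i - 1] = s
--
--     # Pass 2: bottom-up over the reachable states only; each entry carries the whole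
--     # solution (value, selected_fb, selected_gg), decided with the same tie-break
--     # (skip on equal value, else Facebook, else Google), so there is no backtracking pass.
--     table = {st: (0, [], []) for st in needed[0]}
--     for i in range(1, n + 1):
--         cf = costs_fb[i - 1]
--         cg = costs_gg[i - 1]
--         prev, table = table, {}
--         for (fb, gg) in needed[i]:
--             e = prev[(fb, gg)]
--             v = e[0]
--             if cf <= fb:
--                 v = max(v, prev[(fb - cf, gg)][0] + values_fb[i - 1])
--             if cg <= gg:
--                 v = max(v, prev[(fb, gg - cg)][0] + values_gg[i - 1])
--             if v == e[0]:
--                 table[(fb, gg)] = (v, e[1], e[2])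
--             elif cf <= fb and v == prev[(fb - cf, gg)][0] + values_fb[i - 1]:
--                 p = prev[(fb - cf, gg)]
--                 table[(fb, gg)] = (v, [i - 1] + p[1], p[2])
--             else:
--                 p = prev[(fb, gg - cg)]
--                 table[(fb, gg)] = (v, p[1], [i - 1] + p[2])
--
--     return table[(capacity_fb, capacity_gg)]
-- ===== Notes on version B (the rewrite author's own statement) =====
-- stated objective: faster
-- what changed: Replaces A's dense (n+1)x(Cfb+1)x(Cgg+1) value table plus a separate backtracking pass by a sparse two-pass scheme: one pass collects the budget states actually reachable from the full budgets at each level, then a bottom-up pass over only those states builds entries carrying the complete solution (value, selected_fb, selected_gg) with A's tie-break, so the answer is read off a single dictionary cell and the backtracking loop disappears.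
import Mathlib
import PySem

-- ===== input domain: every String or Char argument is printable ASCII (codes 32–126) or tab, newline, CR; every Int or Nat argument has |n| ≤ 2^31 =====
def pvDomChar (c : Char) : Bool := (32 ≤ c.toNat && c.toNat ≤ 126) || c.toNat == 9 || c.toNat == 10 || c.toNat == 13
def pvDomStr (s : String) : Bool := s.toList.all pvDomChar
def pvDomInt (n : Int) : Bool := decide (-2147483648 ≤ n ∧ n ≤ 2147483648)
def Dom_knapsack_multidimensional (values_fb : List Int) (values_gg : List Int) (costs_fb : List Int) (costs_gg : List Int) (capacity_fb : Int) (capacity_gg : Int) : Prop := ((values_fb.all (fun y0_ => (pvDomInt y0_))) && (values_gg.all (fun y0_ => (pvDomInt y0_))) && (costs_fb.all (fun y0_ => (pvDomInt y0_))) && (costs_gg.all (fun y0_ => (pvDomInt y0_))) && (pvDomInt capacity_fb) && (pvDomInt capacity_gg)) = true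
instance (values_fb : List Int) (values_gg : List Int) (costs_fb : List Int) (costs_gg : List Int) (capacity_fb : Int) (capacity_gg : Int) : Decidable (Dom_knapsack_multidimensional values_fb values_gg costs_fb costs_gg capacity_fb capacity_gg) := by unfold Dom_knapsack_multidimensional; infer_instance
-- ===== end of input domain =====

-- B drops both A's dense (n+1)×(Cfb+1)×(Cgg+1) table and A's backtracking pass: it collects the
-- reachable budget states per level and then builds, bottom-up over those states only, entries
-- that carry the whole solution (value, selected_fb, selected_gg) with A's tie-break, so the
-- answer is read off one dictionary cell (objective: alternative algorithm; return values only).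

-- shared Python-read helpers: xs[j] for a Nat index / m[fb][gg] (exact where Python does not raise)
def pvCost (cs : List Int) (j : Nat) : Int := PySem.List.pyGetD cs (j : Int) 0
def pvIdx2 (m : List (List Int)) (fb gg : Int) : Int := PySem.List.pyGetD (PySem.List.pyGetD m fb []) gg 0

-- ===== PORT A =====
-- dp cell update for item index i (Python's i-1), from the previous plane
def pvCellA (vfb vgg cfb cgg : List Int) (i : Nat) (prev : List (List Int)) (fb gg : Int) : Int :=
  let v0 := pvIdx2 prev fb gg
  let v1 := if pvCost cfb i ≤ fb then max v0 (pvIdx2 prev (fb - pvCost cfb i) gg + pvCost vfb i) else v0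
  if pvCost cgg i ≤ gg then max v1 (pvIdx2 prev fb (gg - pvCost cgg i) + pvCost vgg i) else v1

-- dp[i] : the i-th plane of A's table (plane i is a function of plane i-1 only)
def pvDPA (vfb vgg cfb cgg : List Int) (capf capg : Int) : Nat → List (List Int)
  | 0 => List.replicate (capf + 1).toNat (List.replicate (capg + 1).toNat 0)
  | i + 1 =>
    (PySem.List.pyRange 0 (capf + 1)).map (fun fb =>
      (PySem.List.pyRange 0 (capg + 1)).map (fun gg =>
        pvCellA vfb vgg cfb cgg i (pvDPA vfb vgg cfb cgg capf capg i) fb gg))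

-- A's backtracking loop, i = n,…,1 (counter i+1 here is Python's i)
def pvBackA (vfb vgg cfb cgg : List Int) (capf capg : Int) :
    Nat → Int → Int → List Int → List Int → List Int × List Int
  | 0, _, _, sfb, sgg => (sfb, sgg)
  | i + 1, fb, gg, sfb, sgg =>
    if pvIdx2 (pvDPA vfb vgg cfb cgg capf capg (i + 1)) fb gg =
        pvIdx2 (pvDPA vfb vgg cfb cgg capf capg i) fb gg then
      pvBackA vfb vgg cfb cgg capf capg i fb gg sfb sgg
    else if pvCost cfb i ≤ fb ∧ pvIdx2 (pvDPA vfb vgg cfb cgg capf capg (i + 1)) fb gg =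
        pvIdx2 (pvDPA vfb vgg cfb cgg capf capg i) (fb - pvCost cfb i) gg + pvCost vfb i then
      pvBackA vfb vgg cfb cgg capf capg i (fb - pvCost cfb i) gg (sfb ++ [(i : Int)]) sgg
    else if pvCost cgg i ≤ gg ∧ pvIdx2 (pvDPA vfb vgg cfb cgg capf capg (i + 1)) fb gg =
        pvIdx2 (pvDPA vfb vgg cfb cgg capf capg i) fb (gg - pvCost cgg i) + pvCost vgg i then
      pvBackA vfb vgg cfb cgg capf capg i fb (gg - pvCost cgg i) sfb (sgg ++ [(i : Int)])
    else
      pvBackA vfb vgg cfb cgg capf capg i fb gg sfb sgg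

def knapsack_multidimensional (values_fb : List Int) (values_gg : List Int) (costs_fb : List Int) (costs_gg : List Int) (capacity_fb : Int) (capacity_gg : Int) : Int × List Int × List Int :=
  let n := values_fb.length
  let sel := pvBackA values_fb values_gg costs_fb costs_gg capacity_fb capacity_gg n capacity_fb capacity_gg [] []
  (pvIdx2 (pvDPA values_fb values_gg costs_fb costs_gg capacity_fb capacity_gg n) capacity_fb capacity_gg, sel.1, sel.2)

-- ===== PORT B =====
-- one state of needed[i] contributes itself and its (affordable) two predecessor states
def pvAdd3 (cF cG : Int) (acc : PySem.Set (Int × Int)) (p : Int × Int) : PySem.Set (Int × Int) :=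
  let a1 := PySem.Set.add acc p
  let a2 := if cF ≤ p.1 then PySem.Set.add a1 (p.1 - cF, p.2) else a1
  if cG ≤ p.2 then PySem.Set.add a2 (p.1, p.2 - cG) else a2

def pvStepB (cF cG : Int) (S : PySem.Set (Int × Int)) : PySem.Set (Int × Int) :=
  S.foldl (pvAdd3 cF cG) PySem.Set.empty

-- pvLvlB k = needed[n-k] : the states queried at level n-k (k steps down from the top)
def pvLvlB (cfb cgg : List Int) (n : Nat) (capf capg : Int) : Nat → PySem.Set (Int × Int)
  | 0 => PySem.Set.ofList [(capf, capg)]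
  | k + 1 => pvStepB (pvCost cfb (n - k - 1)) (pvCost cgg (n - k - 1)) (pvLvlB cfb cgg n capf capg k)

-- body of the table-filling loop: the (value, selected_fb, selected_gg) entry of state s at
-- level i+1, decided from tables[i] with the skip / Facebook / Google tie-break
def pvEvalB (vfb vgg cfb cgg : List Int) (prev : PySem.Dict (Int × Int) (Int × List Int × List Int)) (i : Nat) (s : Int × Int) : Int × List Int × List Int :=
  let e := prev.getD (s.1, s.2) (0, [], [])
  let v1 := if pvCost cfb i ≤ s.1 then max e.1 ((prev.getD (s.1 - pvCost cfb i, s.2) (0, [], [])).1 + pvCost vfb i) else e.1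
  let v := if pvCost cgg i ≤ s.2 then max v1 ((prev.getD (s.1, s.2 - pvCost cgg i) (0, [], [])).1 + pvCost vgg i) else v1
  if v = e.1 then (v, e.2.1, e.2.2)
  else if pvCost cfb i ≤ s.1 ∧ v = (prev.getD (s.1 - pvCost cfb i, s.2) (0, [], [])).1 + pvCost vfb i then
    (v, (i : Int) :: (prev.getD (s.1 - pvCost cfb i, s.2) (0, [], [])).2.1,
        (prev.getD (s.1 - pvCost cfb i, s.2) (0, [], [])).2.2)
  else
    (v, (prev.getD (s.1, s.2 - pvCost cgg i) (0, [], [])).2.1,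
        (i : Int) :: (prev.getD (s.1, s.2 - pvCost cgg i) (0, [], [])).2.2)

-- tables[i] : the solution entries of the needed states at level i
def pvTblB (vfb vgg cfb cgg : List Int) (n : Nat) (capf capg : Int) : Nat → PySem.Dict (Int × Int) (Int × List Int × List Int)
  | 0 => (pvLvlB cfb cgg n capf capg n).foldl (fun d s => d.insert s (0, [], [])) PySem.Dict.empty
  | i + 1 =>
    (pvLvlB cfb cgg n capf capg (n - (i + 1))).foldl
      (fun d s => d.insert s (pvEvalB vfb vgg cfb cgg (pvTblB vfb vgg cfb cgg n capf capg i) i s))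
      PySem.Dict.empty

def knapsack_multidimensional_alt (values_fb : List Int) (values_gg : List Int) (costs_fb : List Int) (costs_gg : List Int) (capacity_fb : Int) (capacity_gg : Int) : Int × List Int × List Int :=
  let n := values_fb.length
  (pvTblB values_fb values_gg costs_fb costs_gg n capacity_fb capacity_gg n).getD (capacity_fb, capacity_gg) (0, [], [])

-- ===== PRECONDITION & SPEC =====
-- Pre_ = exactly the inputs on which A returns: a negative capacity, a costs list shorter than
-- values_fb, a negative cost among the first n, or a missing values_gg entry whose cost fits the
-- budget all make A raise an IndexError.
def Pre_knapsack_multidimensional (values_fb : List Int) (values_gg : List Int) (costs_fb : List Int) (costs_gg : List Int) (capacity_fb : Int) (capacity_gg : Int) : Prop :=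
  0 ≤ capacity_fb ∧ 0 ≤ capacity_gg ∧
  values_fb.length ≤ costs_fb.length ∧ values_fb.length ≤ costs_gg.length ∧
  (∀ i, i < values_fb.length →
    0 ≤ costs_fb.getD i 0 ∧ 0 ≤ costs_gg.getD i 0 ∧
    (costs_gg.getD i 0 ≤ capacity_gg → i < values_gg.length))
instance (values_fb : List Int) (values_gg : List Int) (costs_fb : List Int) (costs_gg : List Int) (capacity_fb : Int) (capacity_gg : Int) : Decidable (Pre_knapsack_multidimensional values_fb values_gg costs_fb costs_gg capacity_fb capacity_gg) := by unfold Pre_knapsack_multidimensional; infer_instance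

def pvWitness_knapsack_multidimensional : List Int × List Int × List Int × List Int × Int × Int :=
  ([2, 3], [1, 4], [1, 2], [2, 1], 3, 2)

def Spec_knapsack_multidimensional (values_fb : List Int) (values_gg : List Int) (costs_fb : List Int) (costs_gg : List Int) (capacity_fb : Int) (capacity_gg : Int) (out : Int × List Int × List Int) : Prop := out = knapsack_multidimensional_alt values_fb values_gg costs_fb costs_gg capacity_fb capacity_gg
instance (values_fb : List Int) (values_gg : List Int) (costs_fb : List Int) (costs_gg : List Int) (capacity_fb : Int) (capacity_gg : Int) (out : Int × List Int × List Int) : Decidable (Spec_knapsack_multidimensional values_fb values_gg costs_fb costs_gg capacity_fb capacity_gg out) := by unfold Spec_knapsack_multidimensional; infer_instance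

-- ===== CLAIM (what is proved, stated in full; the proofs are below) =====
def Claim_equal_knapsack_multidimensional : Prop := ∀ (values_fb : List Int) (values_gg : List Int) (costs_fb : List Int) (costs_gg : List Int) (capacity_fb : Int) (capacity_gg : Int), Dom_knapsack_multidimensional values_fb values_gg costs_fb costs_gg capacity_fb capacity_gg → Pre_knapsack_multidimensional values_fb values_gg costs_fb costs_gg capacity_fb capacity_gg → Spec_knapsack_multidimensional values_fb values_gg costs_fb costs_gg capacity_fb capacity_gg (knapsack_multidimensional values_fb values_gg costs_fb costs_gg capacity_fb capacity_gg)

-- ===== LEMMAS AND PROOFS =====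

-- the value recurrence both programs evaluate (best value over items 0..i-1)
def pvBest (vfb vgg cfb cgg : List Int) : Nat → Int → Int → Int
  | 0, _, _ => 0
  | i + 1, fb, gg =>
    let r0 := pvBest vfb vgg cfb cgg i fb gg
    let r1 := if pvCost cfb i ≤ fb then max r0 (pvBest vfb vgg cfb cgg i (fb - pvCost cfb i) gg + pvCost vfb i) else r0
    if pvCost cgg i ≤ gg then max r1 (pvBest vfb vgg cfb cgg i fb (gg - pvCost cgg i) + pvCost vgg i) else r1

-- the full-solution recurrence: value plus the two selected lists, with the common tie-break
def pvBestT (vfb vgg cfb cgg : List Int) : Nat → Int → Int → Int × List Int × List Int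
  | 0, _, _ => (0, [], [])
  | i + 1, fb, gg =>
    let v := pvBest vfb vgg cfb cgg (i + 1) fb gg
    if v = pvBest vfb vgg cfb cgg i fb gg then
      (v, (pvBestT vfb vgg cfb cgg i fb gg).2.1, (pvBestT vfb vgg cfb cgg i fb gg).2.2)
    else if pvCost cfb i ≤ fb ∧ v = pvBest vfb vgg cfb cgg i (fb - pvCost cfb i) gg + pvCost vfb i then
      (v, (i : Int) :: (pvBestT vfb vgg cfb cgg i (fb - pvCost cfb i) gg).2.1,
          (pvBestT vfb vgg cfb cgg i (fb - pvCost cfb i) gg).2.2)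
    else
      (v, (pvBestT vfb vgg cfb cgg i fb (gg - pvCost cgg i)).2.1,
          (i : Int) :: (pvBestT vfb vgg cfb cgg i fb (gg - pvCost cgg i)).2.2)

lemma pvBestT_fst (vfb vgg cfb cgg : List Int) : ∀ (i : Nat) (fb gg : Int),
    (pvBestT vfb vgg cfb cgg i fb gg).1 = pvBest vfb vgg cfb cgg i fb gg := by
  intro i fb gg
  cases i with
  | zero => rfl
  | succ i =>
    simp only [pvBestT]
    split_ifs <;> rfl

-- pvBest at a successor level, with the lets written out
lemma pvBest_succ (vfb vgg cfb cgg : List Int) (i : Nat) (fb gg : Int) :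
    pvBest vfb vgg cfb cgg (i + 1) fb gg =
      (if pvCost cgg i ≤ gg then
        max (if pvCost cfb i ≤ fb then
              max (pvBest vfb vgg cfb cgg i fb gg) (pvBest vfb vgg cfb cgg i (fb - pvCost cfb i) gg + pvCost vfb i)
            else pvBest vfb vgg cfb cgg i fb gg)
          (pvBest vfb vgg cfb cgg i fb (gg - pvCost cgg i) + pvCost vgg i)
      else if pvCost cfb i ≤ fb then
        max (pvBest vfb vgg cfb cgg i fb gg) (pvBest vfb vgg cfb cgg i (fb - pvCost cfb i) gg + pvCost vfb i)
      else pvBest vfb vgg cfb cgg i fb gg) := by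
  rw [pvBest]

-- if the new value is neither the skip value nor the Facebook candidate, it is the Google one
lemma pvBest_cases (vfb vgg cfb cgg : List Int) (i : Nat) (fb gg : Int)
    (h0 : pvBest vfb vgg cfb cgg (i + 1) fb gg ≠ pvBest vfb vgg cfb cgg i fb gg)
    (hF : ¬ (pvCost cfb i ≤ fb ∧ pvBest vfb vgg cfb cgg (i + 1) fb gg =
        pvBest vfb vgg cfb cgg i (fb - pvCost cfb i) gg + pvCost vfb i)) :
    pvCost cgg i ≤ gg ∧ pvBest vfb vgg cfb cgg (i + 1) fb gg =
      pvBest vfb vgg cfb cgg i fb (gg - pvCost cgg i) + pvCost vgg i := by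
  have hv := pvBest_succ vfb vgg cfb cgg i fb gg
  by_cases hG : pvCost cgg i ≤ gg <;> by_cases hFa : pvCost cfb i ≤ fb <;>
    simp only [hG, hFa, if_true, if_false] at hv
  · refine ⟨hG, ?_⟩
    rcases max_choice (max (pvBest vfb vgg cfb cgg i fb gg) (pvBest vfb vgg cfb cgg i (fb - pvCost cfb i) gg + pvCost vfb i)) (pvBest vfb vgg cfb cgg i fb (gg - pvCost cgg i) + pvCost vgg i) with h | h
    · rw [h] at hv
      rcases max_choice (pvBest vfb vgg cfb cgg i fb gg) (pvBest vfb vgg cfb cgg i (fb - pvCost cfb i) gg + pvCost vfb i) with h2 | h2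
      · rw [h2] at hv; exact absurd hv h0
      · rw [h2] at hv; exact absurd ⟨hFa, hv⟩ hF
    · rw [h] at hv; exact hv
  · refine ⟨hG, ?_⟩
    rcases max_choice (pvBest vfb vgg cfb cgg i fb gg) (pvBest vfb vgg cfb cgg i fb (gg - pvCost cgg i) + pvCost vgg i) with h | h
    · rw [h] at hv; exact absurd hv h0
    · rw [h] at hv; exact hv
  · rcases max_choice (pvBest vfb vgg cfb cgg i fb gg) (pvBest vfb vgg cfb cgg i (fb - pvCost cfb i) gg + pvCost vfb i) with h | h
    · rw [h] at hv; exact absurd hv h0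
    · rw [h] at hv; exact absurd ⟨hFa, hv⟩ hF
  · exact absurd hv h0

lemma pvCost_eq_getD (cs : List Int) (j : Nat) : pvCost cs j = cs.getD j 0 := by
  simp [pvCost, PySem.List.pyGetD_natCast]

lemma pvIdx2_zero (capf capg fb gg : Int) (h1 : 0 ≤ fb) (h2 : fb ≤ capf) (h3 : 0 ≤ gg) (h4 : gg ≤ capg) :
    pvIdx2 (List.replicate (capf + 1).toNat (List.replicate (capg + 1).toNat 0)) fb gg = 0 := by
  unfold pvIdx2
  rw [PySem.List.pyGetD_eq_getElem _ _ h1 (by simp; omega)]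
  rw [List.getElem_replicate]
  rw [PySem.List.pyGetD_eq_getElem _ _ h3 (by simp; omega)]
  rw [List.getElem_replicate]

lemma pvIdx2_grid (f : Int → Int → Int) (capf capg fb gg : Int)
    (h1 : 0 ≤ fb) (h2 : fb ≤ capf) (h3 : 0 ≤ gg) (h4 : gg ≤ capg) :
    pvIdx2 ((PySem.List.pyRange 0 (capf + 1)).map (fun fb =>
      (PySem.List.pyRange 0 (capg + 1)).map (fun gg => f fb gg))) fb gg = f fb gg := by
  unfold pvIdx2
  have hcf : ((capf + 1).toNat : Int) = capf + 1 := by omega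
  have hcg : ((capg + 1).toNat : Int) = capg + 1 := by omega
  have hfb : ((fb.toNat : Int)) = fb := by omega
  have hgg : ((gg.toNat : Int)) = gg := by omega
  rw [← hcf, ← hfb, PySem.List.pyGetD_map_pyRange _ _ _ _ (by omega), hfb]
  rw [← hcg, ← hgg, PySem.List.pyGetD_map_pyRange _ _ _ _ (by omega), hgg]

-- A's table equals the recurrence on in-range states
lemma pvDPA_eq (vfb vgg cfb cgg : List Int) (capf capg : Int) :
    ∀ i, (∀ j, j < i → 0 ≤ pvCost cfb j ∧ 0 ≤ pvCost cgg j) →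
    ∀ fb gg, 0 ≤ fb → fb ≤ capf → 0 ≤ gg → gg ≤ capg →
    pvIdx2 (pvDPA vfb vgg cfb cgg capf capg i) fb gg = pvBest vfb vgg cfb cgg i fb gg := by
  intro i
  induction i with
  | zero =>
    intro _ fb gg h1 h2 h3 h4
    rw [pvDPA, pvBest, pvIdx2_zero capf capg fb gg h1 h2 h3 h4]
  | succ i ih =>
    intro hc fb gg h1 h2 h3 h4
    have hci := hc i (Nat.lt_succ_self i)
    have hc' : ∀ j, j < i → 0 ≤ pvCost cfb j ∧ 0 ≤ pvCost cgg j :=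
      fun j hj => hc j (Nat.lt_succ_of_lt hj)
    rw [pvDPA, pvIdx2_grid _ capf capg fb gg h1 h2 h3 h4, pvCellA, pvBest]
    have e0 := ih hc' fb gg h1 h2 h3 h4
    simp only [e0]
    by_cases hF : pvCost cfb i ≤ fb <;> by_cases hG : pvCost cgg i ≤ gg
    · rw [ih hc' (fb - pvCost cfb i) gg (by omega) (by omega) h3 h4,
        ih hc' fb (gg - pvCost cgg i) h1 h2 (by omega) (by omega)]
    · rw [ih hc' (fb - pvCost cfb i) gg (by omega) (by omega) h3 h4]
      simp only [eq_false hG, if_false]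
    · rw [ih hc' fb (gg - pvCost cgg i) h1 h2 (by omega) (by omega)]
      simp only [eq_false hF, if_false]
    · simp only [eq_false hF, eq_false hG, if_false]

-- membership facts for the needed-state step
lemma pvAdd3_mono (cF cG : Int) (acc : PySem.Set (Int × Int)) (p q : Int × Int) (hq : q ∈ acc) :
    q ∈ pvAdd3 cF cG acc p := by
  unfold pvAdd3
  split_ifs <;> simp [PySem.Set.mem_add] <;> tauto

lemma pvAdd3_self (cF cG : Int) (acc : PySem.Set (Int × Int)) (p : Int × Int) :
    p ∈ pvAdd3 cF cG acc p ∧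
    (cF ≤ p.1 → (p.1 - cF, p.2) ∈ pvAdd3 cF cG acc p) ∧
    (cG ≤ p.2 → (p.1, p.2 - cG) ∈ pvAdd3 cF cG acc p) := by
  unfold pvAdd3
  refine ⟨?_, ?_, ?_⟩ <;> (intros; split_ifs <;> simp [PySem.Set.mem_add])

lemma pvFoldl_pvAdd3_mono (cF cG : Int) (l : List (Int × Int)) (acc : PySem.Set (Int × Int))
    (q : Int × Int) (hq : q ∈ acc) : q ∈ l.foldl (pvAdd3 cF cG) acc := by
  induction l generalizing acc with
  | nil => exact hq
  | cons a t ih => exact ih _ (pvAdd3_mono cF cG acc a q hq)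

lemma pvStepB_mem (cF cG : Int) (S : PySem.Set (Int × Int)) (p : Int × Int) (hp : p ∈ S) :
    p ∈ pvStepB cF cG S ∧
    (cF ≤ p.1 → (p.1 - cF, p.2) ∈ pvStepB cF cG S) ∧
    (cG ≤ p.2 → (p.1, p.2 - cG) ∈ pvStepB cF cG S) := by
  unfold pvStepB
  generalize PySem.Set.empty = acc
  induction S generalizing acc with
  | nil => cases hp
  | cons a t ih =>
    rcases List.mem_cons.mp hp with rfl | hmem
    · refine ⟨?_, fun h => ?_, fun h => ?_⟩ <;>
        exact pvFoldl_pvAdd3_mono cF cG t _ _ (by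
          first
            | exact (pvAdd3_self cF cG acc p).1
            | exact (pvAdd3_self cF cG acc p).2.1 h
            | exact (pvAdd3_self cF cG acc p).2.2 h)
    · exact ih hmem _

lemma pvGetD_foldl_insert {β : Type} (g : Int × Int → β) (l : List (Int × Int))
    (d : PySem.Dict (Int × Int) β) (q : Int × Int) (dflt : β) :
    (l.foldl (fun d s => d.insert s (g s)) d).getD q dflt = if q ∈ l then g q else d.getD q dflt := by
  induction l generalizing d with
  | nil => simp
  | cons a t ih =>
    rw [List.foldl_cons, ih]
    by_cases hmem : q ∈ t
    · simp [hmem, List.mem_cons]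
    · rw [if_neg hmem, PySem.Dict.getD_insert]
      by_cases hqa : q = a
      · simp [hqa]
      · simp [hqa, hmem]

lemma pvLvlB_succ (cfb cgg : List Int) (n : Nat) (capf capg : Int) (i : Nat) (h : i + 1 ≤ n) :
    pvLvlB cfb cgg n capf capg (n - i) =
      pvStepB (pvCost cfb i) (pvCost cgg i) (pvLvlB cfb cgg n capf capg (n - (i + 1))) := by
  rw [show n - i = (n - (i + 1)) + 1 from by omega, pvLvlB,
      show n - (n - (i + 1)) - 1 = i from by omega]

-- B's tables carry exactly the full-solution recurrence on needed states
lemma pvTblB_eq (vfb vgg cfb cgg : List Int) (n : Nat) (capf capg : Int) :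
    ∀ i, i ≤ n → ∀ s, s ∈ pvLvlB cfb cgg n capf capg (n - i) →
    (pvTblB vfb vgg cfb cgg n capf capg i).getD s (0, [], []) = pvBestT vfb vgg cfb cgg i s.1 s.2 := by
  intro i
  induction i with
  | zero =>
    intro _ s hs
    simp only [Nat.sub_zero] at hs
    rw [pvTblB, pvGetD_foldl_insert, if_pos hs, pvBestT]
  | succ i ih =>
    intro hin s hs
    obtain ⟨a, b⟩ := s
    have hi : i ≤ n := Nat.le_of_succ_le hin
    have hmem := pvStepB_mem (pvCost cfb i) (pvCost cgg i)
      (pvLvlB cfb cgg n capf capg (n - (i + 1))) (a, b) hs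
    rw [← pvLvlB_succ cfb cgg n capf capg i hin] at hmem
    have hmF : pvCost cfb i ≤ a →
        (a - pvCost cfb i, b) ∈ pvLvlB cfb cgg n capf capg (n - i) := hmem.2.1
    have hmG : pvCost cgg i ≤ b →
        (a, b - pvCost cgg i) ∈ pvLvlB cfb cgg n capf capg (n - i) := hmem.2.2
    have e0 := ih hi (a, b) hmem.1
    show (pvTblB vfb vgg cfb cgg n capf capg (i + 1)).getD (a, b) (0, [], []) =
        pvBestT vfb vgg cfb cgg (i + 1) a b
    rw [pvTblB, pvGetD_foldl_insert, if_pos hs]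
    by_cases hF : pvCost cfb i ≤ a <;> by_cases hG : pvCost cgg i ≤ b
    · have eF := ih hi (a - pvCost cfb i, b) (hmF hF)
      have eG := ih hi (a, b - pvCost cgg i) (hmG hG)
      simp only [pvEvalB, pvBestT, e0, eF, eG, pvBestT_fst]
      rw [← pvBest_succ]
    · have eF := ih hi (a - pvCost cfb i, b) (hmF hF)
      have hv : pvBest vfb vgg cfb cgg (i + 1) a b =
          (if pvCost cfb i ≤ a then
            max (pvBest vfb vgg cfb cgg i a b) (pvBest vfb vgg cfb cgg i (a - pvCost cfb i) b + pvCost vfb i)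
          else pvBest vfb vgg cfb cgg i a b) := by
        rw [pvBest_succ, if_neg hG]
      simp only [pvEvalB, pvBestT, e0, eF, pvBestT_fst, eq_false hG, if_false]
      rw [← hv]
      split_ifs with g1 g2
      · rfl
      · rfl
      · exact absurd (pvBest_cases vfb vgg cfb cgg i a b g1 g2).1 hG
    · have eG := ih hi (a, b - pvCost cgg i) (hmG hG)
      have hv : pvBest vfb vgg cfb cgg (i + 1) a b =
          max (pvBest vfb vgg cfb cgg i a b) (pvBest vfb vgg cfb cgg i a (b - pvCost cgg i) + pvCost vgg i) := by
        rw [pvBest_succ, if_pos hG, if_neg hF]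
      simp only [pvEvalB, pvBestT, e0, eG, pvBestT_fst, eq_false hF, false_and, if_false]
      rw [← hv, if_pos hG]
    · have hv : pvBest vfb vgg cfb cgg (i + 1) a b = pvBest vfb vgg cfb cgg i a b := by
        rw [pvBest_succ, if_neg hG, if_neg hF]
      simp only [pvEvalB, pvBestT, e0, pvBestT_fst, eq_false hF, eq_false hG, false_and, if_false, hv]
      simp

-- A's backtracking produces exactly the lists of the full-solution recurrence
lemma pvBackA_eq (vfb vgg cfb cgg : List Int) (capf capg : Int) (n : Nat)
    (hc : ∀ j, j < n → 0 ≤ pvCost cfb j ∧ 0 ≤ pvCost cgg j) :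
    ∀ i, i ≤ n → ∀ fb gg sfb sgg, 0 ≤ fb → fb ≤ capf → 0 ≤ gg → gg ≤ capg →
    pvBackA vfb vgg cfb cgg capf capg i fb gg sfb sgg =
      (sfb ++ (pvBestT vfb vgg cfb cgg i fb gg).2.1, sgg ++ (pvBestT vfb vgg cfb cgg i fb gg).2.2) := by
  intro i
  induction i with
  | zero => intro _ fb gg sfb sgg _ _ _ _; rw [pvBackA, pvBestT]; simp
  | succ i ih =>
    intro hin fb gg sfb sgg h1 h2 h3 h4
    have hi : i ≤ n := Nat.le_of_succ_le hin
    have hci := hc i (Nat.lt_of_lt_of_le (Nat.lt_succ_self i) hin)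
    have hcsub : ∀ j, j < i + 1 → 0 ≤ pvCost cfb j ∧ 0 ≤ pvCost cgg j :=
      fun j hj => hc j (Nat.lt_of_lt_of_le hj hin)
    have hcsub' : ∀ j, j < i → 0 ≤ pvCost cfb j ∧ 0 ≤ pvCost cgg j :=
      fun j hj => hcsub j (Nat.lt_succ_of_lt hj)
    have e1 := pvDPA_eq vfb vgg cfb cgg capf capg (i + 1) hcsub fb gg h1 h2 h3 h4
    have e0 := pvDPA_eq vfb vgg cfb cgg capf capg i hcsub' fb gg h1 h2 h3 h4
    rw [pvBackA, e1, e0]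
    simp only [pvBestT]
    by_cases hF : pvCost cfb i ≤ fb <;> by_cases hG : pvCost cgg i ≤ gg
    · rw [pvDPA_eq vfb vgg cfb cgg capf capg i hcsub' (fb - pvCost cfb i) gg (by omega) (by omega) h3 h4,
        pvDPA_eq vfb vgg cfb cgg capf capg i hcsub' fb (gg - pvCost cgg i) h1 h2 (by omega) (by omega)]
      split_ifs with g1 g2 g3
      · simpa using ih hi fb gg sfb sgg h1 h2 h3 h4
      · rw [ih hi (fb - pvCost cfb i) gg _ _ (by omega) (by omega) h3 h4]
        simp
      · rw [ih hi fb (gg - pvCost cgg i) _ _ h1 h2 (by omega) (by omega)]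
        simp
      · exact absurd (pvBest_cases vfb vgg cfb cgg i fb gg g1 g2) g3
    · rw [pvDPA_eq vfb vgg cfb cgg capf capg i hcsub' (fb - pvCost cfb i) gg (by omega) (by omega) h3 h4]
      simp only [eq_false hG, false_and, if_false]
      split_ifs with g1 g2
      · simpa using ih hi fb gg sfb sgg h1 h2 h3 h4
      · rw [ih hi (fb - pvCost cfb i) gg _ _ (by omega) (by omega) h3 h4]
        simp
      · exact absurd (pvBest_cases vfb vgg cfb cgg i fb gg g1 g2).1 hG
    · rw [pvDPA_eq vfb vgg cfb cgg capf capg i hcsub' fb (gg - pvCost cgg i) h1 h2 (by omega) (by omega)]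
      simp only [eq_false hF, false_and, if_false]
      split_ifs with g1 g2
      · simpa using ih hi fb gg sfb sgg h1 h2 h3 h4
      · rw [ih hi fb (gg - pvCost cgg i) _ _ h1 h2 (by omega) (by omega)]
        simp
      · exact absurd (pvBest_cases vfb vgg cfb cgg i fb gg g1 (fun h => hF h.1)) g2
    · simp only [eq_false hF, eq_false hG, false_and, if_false]
      split_ifs with g1
      · simpa using ih hi fb gg sfb sgg h1 h2 h3 h4
      · exact absurd (pvBest_cases vfb vgg cfb cgg i fb gg g1 (fun h => hF h.1)).1 hG

-- ===== VERDICT (by name: the statement is the Claim_ definition above) =====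
theorem knapsack_multidimensional_spec : Claim_equal_knapsack_multidimensional := by
  intro vfb vgg cfb cgg capf capg _ hpre
  obtain ⟨hcf, hcg, _, _, hcost⟩ := hpre
  have hc : ∀ j, j < vfb.length → 0 ≤ pvCost cfb j ∧ 0 ≤ pvCost cgg j := by
    intro j hj
    rw [pvCost_eq_getD, pvCost_eq_getD]
    exact ⟨(hcost j hj).1, (hcost j hj).2.1⟩
  have hmem0 : (capf, capg) ∈ pvLvlB cfb cgg vfb.length capf capg (vfb.length - vfb.length) := by
    simp [pvLvlB, PySem.Set.mem_ofList]
  unfold Spec_knapsack_multidimensional knapsack_multidimensional knapsack_multidimensional_alt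
  have hval : pvIdx2 (pvDPA vfb vgg cfb cgg capf capg vfb.length) capf capg =
      pvBest vfb vgg cfb cgg vfb.length capf capg :=
    pvDPA_eq vfb vgg cfb cgg capf capg vfb.length hc capf capg hcf le_rfl hcg le_rfl
  have hback := pvBackA_eq vfb vgg cfb cgg capf capg vfb.length hc vfb.length le_rfl
    capf capg [] [] hcf le_rfl hcg le_rfl
  have htbl := pvTblB_eq vfb vgg cfb cgg vfb.length capf capg vfb.length le_rfl (capf, capg) hmem0
  simp only [hback, htbl, hval, List.nil_append, ← pvBestT_fst]
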